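-- pv_equiv track=rewrite | github.com/beksultantuleev/LOS_NLOS_detection | notes2.py | acquisition_modifier
-- ===== SOURCE A (Python) =====
-- def acquisition_modifier(acquisition_number, length_of_acquisitions):
--     if acquisition_number == 1:
--         return [1]*length_of_acquisitions
--     elif acquisition_number == 0:
--         return [0]*length_of_acquisitions
--     lis = []
--     for i in range(length_of_acquisitions):
--         lis.append(i)
--     lis = sorted(lis*acquisition_number)[:length_of_acquisitions]
--     return lis
-- ===== SOURCE B (Python) =====
-- def acquisition_modifier(acquisition_number, length_of_acquisitions):
--     if acquisition_number in (0, 1):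
--         return [acquisition_number] * length_of_acquisitions
--     if acquisition_number < 0:
--         return []
--     # emit blocks of acquisition_number copies of 0, 1, 2, ... then a partial block
--     out = []
--     v = 0
--     remaining = length_of_acquisitions
--     while acquisition_number <= remaining:
--         out.extend([v] * acquisition_number)
--         v += 1
--         remaining -= acquisition_number
--     out.extend([v] * remaining)
--     return out
-- ===== Notes on version B (the rewrite author's own statement) =====
-- stated objective: faster
-- what changed: instead of materialising range(L) repeated acquisition_number times, sorting and truncating, B emits the sorted output directly as consecutive blocks of acquisition_number copies of 0,1,2,... plus a partial block, in one pass with no sort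
import Mathlib
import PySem

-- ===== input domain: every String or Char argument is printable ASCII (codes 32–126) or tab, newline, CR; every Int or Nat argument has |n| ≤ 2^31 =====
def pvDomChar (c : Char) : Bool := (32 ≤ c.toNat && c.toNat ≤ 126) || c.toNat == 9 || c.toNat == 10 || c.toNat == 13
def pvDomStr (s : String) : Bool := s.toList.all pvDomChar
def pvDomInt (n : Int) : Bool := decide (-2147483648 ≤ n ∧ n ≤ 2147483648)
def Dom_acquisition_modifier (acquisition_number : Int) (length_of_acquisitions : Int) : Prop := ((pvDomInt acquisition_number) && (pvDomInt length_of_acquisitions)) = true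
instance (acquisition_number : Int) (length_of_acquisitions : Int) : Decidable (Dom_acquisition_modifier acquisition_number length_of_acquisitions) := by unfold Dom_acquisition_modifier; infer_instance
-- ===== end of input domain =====

-- B emits the sorted output directly as blocks of acquisition_number copies of 0,1,2,... in one pass (no repeat+sort): asymptotically faster.


-- ===== PORT A =====
def acquisition_modifier (acquisition_number : Int) (length_of_acquisitions : Int) : List Int :=
  if acquisition_number = 1 then PySem.List.pyRepeat [1] length_of_acquisitions
  else if acquisition_number = 0 then PySem.List.pyRepeat [0] length_of_acquisitions
  else
    -- Python's list.append on a dynamic array: fold pushing onto an Array (exact same elements/order)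
    let lis := ((PySem.List.pyRange 0 length_of_acquisitions 1).foldl
      (fun acc i => acc.push i) #[]).toList
    PySem.List.slice (PySem.List.sorted (PySem.List.pyRepeat lis acquisition_number) (fun x => x) false) none (some length_of_acquisitions)

-- ===== PORT B =====
-- the while loop: out.extend([v]*a); v += 1; remaining -= a  while a <= remaining,
-- then the trailing partial block out.extend([v]*remaining).
-- ('1 ≤ a' in the guard only makes the recursion total; B only calls it with a ≥ 2)
def amLoop (a : Int) (v : Int) (remaining : Int) (out : List Int) : List Int :=
  if _h : a ≤ remaining ∧ 1 ≤ a then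
    amLoop a (v + 1) (remaining - a) (out ++ List.replicate a.toNat v)
  else out ++ List.replicate remaining.toNat v
termination_by remaining.toNat
decreasing_by omega

def acquisition_modifier_alt (acquisition_number : Int) (length_of_acquisitions : Int) : List Int :=
  if acquisition_number = 0 ∨ acquisition_number = 1 then
    List.replicate length_of_acquisitions.toNat acquisition_number
  else if acquisition_number < 0 then []
  else amLoop acquisition_number 0 length_of_acquisitions []

-- ===== PRECONDITION & SPEC =====
def Spec_acquisition_modifier (acquisition_number : Int) (length_of_acquisitions : Int) (out : List Int) : Prop := out = acquisition_modifier_alt acquisition_number length_of_acquisitions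
instance (acquisition_number : Int) (length_of_acquisitions : Int) (out : List Int) : Decidable (Spec_acquisition_modifier acquisition_number length_of_acquisitions out) := by unfold Spec_acquisition_modifier; infer_instance

-- ===== CLAIM (what is proved, stated in full; the proofs are below) =====
def Claim_equal_acquisition_modifier : Prop := ∀ (acquisition_number : Int) (length_of_acquisitions : Int), Dom_acquisition_modifier acquisition_number length_of_acquisitions → Spec_acquisition_modifier acquisition_number length_of_acquisitions (acquisition_modifier acquisition_number length_of_acquisitions)

-- ===== LEMMAS AND PROOFS =====

theorem count_flatten_replicate {α : Type} [DecidableEq α] (n : Nat) (xs : List α) (b : α) :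
    (List.replicate n xs).flatten.count b = n * xs.count b := by
  induction n with
  | zero => simp
  | succ n ih => simp [List.replicate_succ, ih]; ring

theorem count_flatMap_replicate {α : Type} [DecidableEq α] (n : Nat) (xs : List α) (b : α) :
    (xs.flatMap (fun x => List.replicate n x)).count b = n * xs.count b := by
  induction xs with
  | nil => simp
  | cons x t ih =>
    simp [List.flatMap_cons, List.count_append, ih, List.count_replicate, List.count_cons]
    split_ifs <;> ring

theorem flatten_replicate_perm {α : Type} [DecidableEq α] (n : Nat) (xs : List α) :
    (xs.flatMap (fun x => List.replicate n x)).Perm (List.replicate n xs).flatten := by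
  rw [List.perm_iff_count]
  intro b
  rw [count_flatten_replicate, count_flatMap_replicate]

theorem flatMap_replicate_range (n L : Nat) (hn : 0 < n) :
    (List.range L).flatMap (fun k => List.replicate n k) =
      (List.range (n * L)).map (fun j => j / n) := by
  induction L with
  | zero => simp
  | succ L ih =>
    rw [List.range_succ, Nat.mul_succ, List.range_add, List.flatMap_append, ih, List.map_append]
    congr 1
    simp only [List.flatMap_cons, List.flatMap_nil, List.append_nil, List.map_map]
    symm
    rw [List.eq_replicate_iff]
    refine ⟨by simp, ?_⟩
    intro b hb
    simp only [List.mem_map, List.mem_range, Function.comp] at hb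
    obtain ⟨k, hk, rfl⟩ := hb
    rw [Nat.mul_add_div hn, Nat.div_eq_of_lt hk]
    omega

theorem array_push_loop_toList {α : Type} (l : List α) :
    (l.foldl (fun acc x => acc.push x) #[]).toList = l := by
  simp

theorem replicate_div_block (n r : Nat) (v : Int) (hr : r ≤ n) :
    (List.range r).map (fun i => v + ((i / n : Nat) : Int)) = List.replicate r v := by
  rw [List.eq_replicate_iff]
  refine ⟨by simp, ?_⟩
  intro b hb
  simp only [List.mem_map, List.mem_range] at hb
  obtain ⟨i, hi, rfl⟩ := hb
  rw [Nat.div_eq_of_lt (by omega)]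
  simp

theorem amLoop_eq (a : Int) (ha : 1 ≤ a) (r : Nat) (v : Int) (out : List Int) :
    amLoop a v (r : Int) out =
      out ++ (List.range r).map (fun i => v + ((i / a.toNat : Nat) : Int)) := by
  induction r using Nat.strong_induction_on generalizing v out with
  | _ r ih =>
    set n := a.toNat with hn
    have hn1 : 1 ≤ n := by omega
    rw [amLoop]
    by_cases h : a ≤ (r : Int)
    · have hnr : n ≤ r := by omega
      simp only [h, ha, and_self, dif_pos]
      have hcast : (r : Int) - a = ((r - n : Nat) : Int) := by omega
      rw [hcast, ih (r - n) (by omega)]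
      have hsplit : List.range r = List.range n ++ (List.range (r - n)).map (fun i => n + i) := by
        conv_lhs => rw [show r = n + (r - n) from by omega]
        rw [List.range_add]
      rw [hsplit, List.map_append, List.map_map, List.append_assoc,
        replicate_div_block n n v le_rfl, ← hn]
      congr 2
      apply List.map_congr_left
      intro i _
      simp only [Function.comp]
      rw [Nat.add_comm n i, Nat.add_div_right _ (by omega)]
      push_cast
      ring
    · simp only [h, false_and, dif_neg, not_false_iff]
      have hrn : r ≤ n := by omega
      rw [Int.toNat_natCast, replicate_div_block n r v hrn]

-- ===== VERDICT (by name: the statement is the Claim_ definition above) =====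
theorem acquisition_modifier_spec : Claim_equal_acquisition_modifier := by
  intro a L _
  unfold Spec_acquisition_modifier acquisition_modifier acquisition_modifier_alt
  by_cases h1 : a = 1
  · simp [h1, PySem.List.pyRepeat]
  by_cases h0 : a = 0
  · simp [h0, PySem.List.pyRepeat]
  simp only [h1, h0, or_self, if_false]
  rw [array_push_loop_toList]
  by_cases hneg : a < 0
  · have : a.toNat = 0 := by omega
    simp [hneg, PySem.List.pyRepeat, this, PySem.List.slice, PySem.List.clampIdx,
      PySem.List.sorted]
  simp only [hneg, if_false]
  have ha : 0 < a := by omega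
  set n := a.toNat with hn
  have hna : (n : Int) = a := Int.toNat_of_nonneg ha.le
  have hn0 : 0 < n := by omega
  have hR : PySem.List.pyRange 0 L 1 = (List.range L.toNat).map (fun k => ((k : Nat) : Int)) := by
    rw [PySem.List.pyRange_one]; simp
  by_cases hL : 0 ≤ L
  · -- the repeated sorted list is [j // a for j in range(a*L)]
    have hsorted :
        PySem.List.sorted (PySem.List.pyRepeat (PySem.List.pyRange 0 L 1) a) (fun x => x) false =
          (List.range (n * L.toNat)).map (fun j => ((j / n : Nat) : Int)) := by
      apply PySem.List.sorted_id_eq_of_perm_of_pairwise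
      · -- permutation
        have h2 : PySem.List.pyRepeat (PySem.List.pyRange 0 L 1) a =
            (List.replicate n (PySem.List.pyRange 0 L 1)).flatten := rfl
        have h3 : (List.range L.toNat).flatMap (fun k => List.replicate n ((k : Nat) : Int)) =
            (List.range (n * L.toNat)).map (fun j => ((j / n : Nat) : Int)) := by
          have h4 := congrArg (List.map (fun x : Nat => (x : Int)))
            (flatMap_replicate_range n L.toNat hn0)
          rw [List.map_flatMap, List.map_map] at h4
          simpa [List.map_replicate] using h4
        rw [h2, hR]
        refine List.Perm.trans ?_ (flatten_replicate_perm n _)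
        rw [List.flatMap_map, h3]
      · -- sortedness
        refine List.Pairwise.map _ ?_ (List.pairwise_lt_range)
        intro p q hpq
        exact_mod_cast Nat.div_le_div_right (Nat.le_of_lt hpq)
    rw [hsorted, PySem.List.slice_to _ hL, ← List.map_take, List.take_range]
    have hmin : min L.toNat (n * L.toNat) = L.toNat :=
      Nat.min_eq_left (Nat.le_mul_of_pos_left _ hn0)
    rw [hmin]
    conv_rhs => rw [show L = ((L.toNat : Nat) : Int) from by omega]
    rw [amLoop_eq a (by omega)]
    simp only [List.nil_append, zero_add, ← hn]
    
  · -- negative length: everything is empty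
    have hnil : PySem.List.pyRange 0 L 1 = [] := PySem.List.pyRange_one_eq_nil (by omega)
    rw [hnil]
    have hBnil : amLoop a 0 L [] = [] := by
      rw [amLoop]
      have : ¬ (a ≤ L ∧ 1 ≤ a) := by omega
      simp [this, Int.toNat_of_nonpos (by omega : L ≤ 0)]
    rw [hBnil]
    simp [PySem.List.pyRepeat, PySem.List.slice, PySem.List.clampIdx, PySem.List.sorted]
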